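-- pv_equiv track=rewrite | github.com/yanliji/VS-FCL | models/sttr.py | hmd
-- ===== SOURCE A (Python) =====
-- def hmd(x, y):
--     count = 0
--     for idx, m in enumerate(list(x)):
--         for idx1, n in enumerate(list(y)):
--             if idx == idx1:
--                  z = m ^ n
--                  while z != 0:
--                      if z & 1 == 1:
--                          count += 1
--                      z = z >> 1
--     return count
-- ===== SOURCE B (Python) =====
-- def hmd(x, y):
--     # Single pass over the aligned pairs; popcount via int.bit_count().
--     return sum((m ^ n).bit_count() for m, n in zip(x, y))
-- ===== Notes on version B (the rewrite author's own statement) =====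
-- stated objective: alternative
-- what changed: Replaced the double enumerate scan with a matching-index test and a per-bit shift loop by a single pass over zip(x,y) summing (m^n).bit_count(); Pre_ excludes inputs with an aligned pair of opposite signs, on which A's 'while z != 0: z >>= 1' never terminates (z converges to -1).
import Mathlib
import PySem

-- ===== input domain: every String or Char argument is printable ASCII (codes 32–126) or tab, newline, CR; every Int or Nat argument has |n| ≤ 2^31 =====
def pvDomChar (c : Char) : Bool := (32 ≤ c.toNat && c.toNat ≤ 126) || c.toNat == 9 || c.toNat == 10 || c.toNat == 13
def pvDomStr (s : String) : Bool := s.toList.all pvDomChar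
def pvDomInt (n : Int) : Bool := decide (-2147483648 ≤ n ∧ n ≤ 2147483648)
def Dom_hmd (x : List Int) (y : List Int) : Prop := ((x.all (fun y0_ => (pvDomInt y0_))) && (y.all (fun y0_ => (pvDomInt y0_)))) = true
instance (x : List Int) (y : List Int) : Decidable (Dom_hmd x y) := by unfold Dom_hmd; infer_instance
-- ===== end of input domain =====

-- B replaces A's double enumerate scan + per-bit shift loop by one pass over zip(x,y)
-- summing (m ^ n).bit_count(): one linear pass instead of the nested index-matching scans.


-- ===== PORT A =====
-- Python's 'while z != 0: if z & 1 == 1: count += 1; z = z >> 1'. Inside Pre_ the xor z is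
-- nonnegative, so the loop runs on z.toNat = z exactly; for negative z Python diverges
-- (z >> 1 converges to -1), and those inputs are excluded by Pre_hmd.
def bitloopA (z : Nat) (count : Int) : Int :=
  if z = 0 then count
  else bitloopA (z >>> 1) (if z &&& 1 = 1 then count + 1 else count)
termination_by z
decreasing_by simpa [Nat.shiftRight_one] using Nat.div_lt_self (Nat.pos_of_ne_zero (by assumption)) (by norm_num)

def hmd (x : List Int) (y : List Int) : Int :=
  (PySem.List.enumerate x).foldl (fun count p =>
    (PySem.List.enumerate y).foldl (fun count q =>
      if p.1 = q.1 then bitloopA (PySem.Int.bxor p.2 q.2).toNat count else count) count) 0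

-- ===== PORT B =====
def hmd_alt (x : List Int) (y : List Int) : Int :=
  ((x.zip y).map (fun pr => (PySem.Int.bitCount (PySem.Int.bxor pr.1 pr.2) : Int))).sum

-- ===== PRECONDITION & SPEC =====
-- Pre_ excludes inputs with an aligned pair of opposite signs: there m ^ n < 0 and A's
-- 'while z != 0: z = z >> 1' never terminates (z converges to -1), so A returns no value.
def Pre_hmd (x : List Int) (y : List Int) : Prop :=
  ∀ pr ∈ x.zip y, ((pr.1 : Int) < 0 ↔ (pr.2 : Int) < 0)
instance (x : List Int) (y : List Int) : Decidable (Pre_hmd x y) := by unfold Pre_hmd; infer_instance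
def pvWitness_hmd : List Int × List Int := ([3, -2, 7], [5, -9])

def Spec_hmd (x : List Int) (y : List Int) (out : Int) : Prop := out = hmd_alt x y
instance (x : List Int) (y : List Int) (out : Int) : Decidable (Spec_hmd x y out) := by unfold Spec_hmd; infer_instance

-- ===== CLAIM (what is proved, stated in full; the proofs are below) =====
def Claim_equal_hmd : Prop := ∀ (x : List Int) (y : List Int), Dom_hmd x y → Pre_hmd x y → Spec_hmd x y (hmd x y)

-- ===== LEMMAS AND PROOFS =====

-- A's per-pair contribution: bit count of the xor, read through .toNat as the port does.
def pairCnt (m n : Int) : Int := (PySem.Int.bitCount ((PySem.Int.bxor m n).toNat : Int) : Int)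

-- Sum A's inner loop adds for an outer element with index i and value m.
def innerSum (y : List Int) (s i m : Int) : Int :=
  ((PySem.List.enumerate y s).map (fun q => if i = q.1 then pairCnt m q.2 else 0)).sum

lemma popA (n : Nat) (c : Int) : bitloopA n c = c + (PySem.Int.bitCount (n : Int) : Int) := by
  induction n using Nat.strong_induction_on generalizing c with
  | _ n ih =>
    rw [bitloopA]
    by_cases h : n = 0
    · simp [h, PySem.Int.bitCount_zero]
    · have hlt : n >>> 1 < n := by
        simpa [Nat.shiftRight_one] using Nat.div_lt_self (Nat.pos_of_ne_zero h) (by norm_num)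
      rw [if_neg h, ih _ hlt]
      rw [PySem.Int.bitCount_natCast (Nat.pos_of_ne_zero h)]
      have hand : n &&& 1 = n % 2 := Nat.and_one_is_mod n
      rcases Nat.mod_two_eq_zero_or_one n with h2 | h2
      · simp [Nat.shiftRight_one, hand, h2]
      · simp [Nat.shiftRight_one, hand, h2]
        omega

lemma bxor_nonneg_of_sign_iff {a b : Int} (h : a < 0 ↔ b < 0) : 0 ≤ PySem.Int.bxor a b := by
  unfold PySem.Int.bxor
  split_ifs with h1 h2 h2 <;> [positivity; omega; omega; positivity]

lemma inner_fold (y : List Int) (p : Int × Int) (c : Int) :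
    (PySem.List.enumerate y).foldl
      (fun count q => if p.1 = q.1 then bitloopA (PySem.Int.bxor p.2 q.2).toNat count else count) c
      = c + innerSum y 0 p.1 p.2 := by
  have hf : (fun (count : Int) (q : Int × Int) =>
        if p.1 = q.1 then bitloopA (PySem.Int.bxor p.2 q.2).toNat count else count)
      = fun count q => count + (if p.1 = q.1 then pairCnt p.2 q.2 else 0) := by
    funext c q
    by_cases h : p.1 = q.1
    · simp [h, popA, pairCnt]
    · simp [h]
  rw [hf, PySem.List.foldl_add]
  rfl

lemma innerSum_of_lt (y : List Int) : ∀ (s i m : Int), i < s → innerSum y s i m = 0 := by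
  induction y with
  | nil => intro s i m _; simp [innerSum, PySem.List.enumerate_nil]
  | cons n y ih =>
    intro s i m h
    have hne : i ≠ s := by omega
    have := ih (s + 1) i m (by omega)
    simp only [innerSum, PySem.List.enumerate_cons, List.map_cons, List.sum_cons, if_neg hne] at *
    omega

lemma innerSum_cons_ne (n : Int) (y : List Int) (s i m : Int) (h : i ≠ s) :
    innerSum (n :: y) s i m = innerSum y (s + 1) i m := by
  simp [innerSum, PySem.List.enumerate_cons, if_neg h]

lemma zipSum_main : ∀ (x y : List Int) (s : Int),
    ((PySem.List.enumerate x s).map (fun p => innerSum y s p.1 p.2)).sum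
      = ((x.zip y).map (fun pr => pairCnt pr.1 pr.2)).sum := by
  intro x
  induction x with
  | nil => intro y s; simp [PySem.List.enumerate_nil]
  | cons m x ih =>
    intro y s
    cases y with
    | nil =>
      have hz : ∀ (t i mm : Int), innerSum [] t i mm = 0 := by
        intro t i mm; simp [innerSum, PySem.List.enumerate_nil]
      simp [PySem.List.enumerate_cons, hz, List.map_const']
    | cons n y =>
      rw [PySem.List.enumerate_cons, List.map_cons, List.sum_cons]
      have h0 : innerSum y (s + 1) s m = 0 := innerSum_of_lt y (s + 1) s m (by omega)
      have h1 : innerSum (n :: y) s s m = pairCnt m n := by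
        rw [innerSum, PySem.List.enumerate_cons, List.map_cons, List.sum_cons, if_pos rfl,
          show ((PySem.List.enumerate y (s + 1)).map
              (fun q => if s = q.1 then pairCnt m q.2 else 0)).sum = innerSum y (s + 1) s m from rfl,
          h0, add_zero]
      have h2 : ((PySem.List.enumerate x (s + 1)).map (fun p => innerSum (n :: y) s p.1 p.2))
          = ((PySem.List.enumerate x (s + 1)).map (fun p => innerSum y (s + 1) p.1 p.2)) := by
        apply List.map_congr_left
        intro p hp
        rcases (PySem.List.mem_enumerate_iff _ _ _).1 hp with ⟨k, hk, hpk⟩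
        subst hpk
        exact innerSum_cons_ne n y s _ _ (by show s + 1 + (k : Int) ≠ s; omega)
      rw [h1, h2, ih y (s + 1)]
      simp [List.zip]

lemma hmd_as_zipSum (x y : List Int) :
    hmd x y = ((x.zip y).map (fun pr => pairCnt pr.1 pr.2)).sum := by
  unfold hmd
  have hf : (fun (count : Int) (p : Int × Int) =>
        (PySem.List.enumerate y).foldl
          (fun count q => if p.1 = q.1 then bitloopA (PySem.Int.bxor p.2 q.2).toNat count else count) count)
      = fun count p => count + innerSum y 0 p.1 p.2 := by
    funext c p; exact inner_fold y p c
  rw [hf, PySem.List.foldl_add, ← zipSum_main x y 0]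
  simp

-- ===== VERDICT (by name: the statement is the Claim_ definition above) =====
theorem hmd_spec : Claim_equal_hmd := by
  intro x y _ hpre
  unfold Spec_hmd hmd_alt
  rw [hmd_as_zipSum]
  apply congrArg List.sum
  apply List.map_congr_left
  intro pr hpr
  have hnn : 0 ≤ PySem.Int.bxor pr.1 pr.2 := bxor_nonneg_of_sign_iff (hpre pr hpr)
  unfold pairCnt
  rw [Int.toNat_of_nonneg hnn]
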